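-- pv_equiv track=rewrite | github.com/qianwu/personal-project | mock_review.py | find_max_difference
-- ===== SOURCE A (Python) =====
-- def find_max_difference(numbers):
--     if len(numbers) < 2:
--         return None
--     min_num = numbers[0]
--     max_diff = 0
--     for num in numbers:
--         if num < min_num:
--             min_num = num
--         if num - min_num > max_diff:
--             max_diff = num - min_num
--     return max_diff
-- ===== SOURCE B (Python) =====
-- def find_max_difference(numbers):
--     if len(numbers) < 2:
--         return None
--     # build suffix maxima by one right-to-left pass
--     suffix = []
--     running = None
--     for x in reversed(numbers):
--         running = x if running is None else max(x, running)
--         suffix.append(running)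
--     suffix.reverse()
--     # best difference pairing each element with the max at or after it
--     return max(s - x for s, x in zip(suffix, numbers))
-- ===== Notes on version B (the rewrite author's own statement) =====
-- stated objective: alternative
-- what changed: Replaces the running-minimum single pass with a suffix-maximum table built right-to-left plus a second scan taking max(suffix[i] - numbers[i]).
import Mathlib
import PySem

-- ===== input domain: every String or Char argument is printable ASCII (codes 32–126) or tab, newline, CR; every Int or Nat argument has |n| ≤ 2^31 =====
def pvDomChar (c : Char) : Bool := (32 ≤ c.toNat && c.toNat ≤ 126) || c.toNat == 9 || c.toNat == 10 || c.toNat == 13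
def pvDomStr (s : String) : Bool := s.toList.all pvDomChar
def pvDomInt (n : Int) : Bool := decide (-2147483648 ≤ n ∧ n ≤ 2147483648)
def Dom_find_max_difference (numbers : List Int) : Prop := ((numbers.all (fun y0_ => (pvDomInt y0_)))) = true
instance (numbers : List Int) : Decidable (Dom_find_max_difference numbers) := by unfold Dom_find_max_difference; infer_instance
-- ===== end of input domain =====

-- B replaces A's running-minimum pass by a suffix-maximum table plus a scan (alternative algorithm, same cost).

-- ===== PORT A =====
-- literal transliteration: running minimum and running best difference, one left-to-right pass
def find_max_difference (numbers : List Int) : Option Int :=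
  if numbers.length < 2 then none
  else
    match numbers with
    | [] => none  -- unreachable: length ≥ 2
    | n0 :: _ =>
      let r := numbers.foldl
        (fun (st : Int × Int) num =>
          let mn := if num < st.1 then num else st.1
          let md := if num - mn > st.2 then num - mn else st.2
          (mn, md)) (n0, 0)
      some r.2

-- ===== PORT B =====
-- right-to-left pass building the suffix-maximum list (Python builds it over reversed(numbers);
-- foldr is that same right-to-left accumulation)
def sufList (xs : List Int) : List Int :=
  xs.foldr (fun x acc =>
    match acc with
    | [] => [x]
    | s :: t => max x s :: s :: t) []

def find_max_difference_alt (numbers : List Int) : Option Int :=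
  if numbers.length < 2 then none
  else
    match List.zipWith (fun s x => s - x) (sufList numbers) numbers with
    | [] => none  -- unreachable: numbers nonempty
    | d :: ds => some (List.foldl max d ds)

-- ===== PRECONDITION & SPEC =====
def Spec_find_max_difference (numbers : List Int) (out : Option Int) : Prop := out = find_max_difference_alt numbers
instance (numbers : List Int) (out : Option Int) : Decidable (Spec_find_max_difference numbers out) := by unfold Spec_find_max_difference; infer_instance

-- ===== CLAIM (what is proved, stated in full; the proofs are below) =====
def Claim_equal_find_max_difference : Prop := ∀ (numbers : List Int), Dom_find_max_difference numbers → Spec_find_max_difference numbers (find_max_difference numbers)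

-- ===== LEMMAS AND PROOFS =====

-- suffix maximum of x :: xs
def smax (x : Int) : List Int → Int
  | [] => x
  | y :: t => max x (smax y t)

-- best difference over pairs i ≤ j inside x :: xs
def bv (x : Int) : List Int → Int
  | [] => 0
  | y :: t => max (smax x (y :: t) - x) (bv y t)

-- the per-element differences A's fold takes maxima over (running min threaded through)
def diffs (mn : Int) : List Int → List Int
  | [] => []
  | x :: t => (x - min mn x) :: diffs (min mn x) t

theorem sufList_step (a : Int) (l : List Int) :
    sufList (a :: l) = (match sufList l with
      | [] => [a]
      | s :: t => max a s :: s :: t) := rfl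

theorem sufList_cons (x : Int) (xs : List Int) :
    sufList (x :: xs) = smax x xs :: sufList xs := by
  induction xs generalizing x with
  | nil => rfl
  | cons y t ih =>
    rw [sufList_step x (y :: t), ih y]
    simp [smax]

theorem foldA_eq_diffs (xs : List Int) : ∀ mn md : Int,
    (xs.foldl (fun (st : Int × Int) num =>
        let mn := if num < st.1 then num else st.1
        let md := if num - mn > st.2 then num - mn else st.2
        (mn, md)) (mn, md)).2
      = List.foldl max md (diffs mn xs) := by
  induction xs with
  | nil => intro mn md; rfl
  | cons x t ih =>
    intro mn md
    simp only [List.foldl, diffs]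
    rw [ih]
    have h1 : (if x < mn then x else mn) = min mn x := by omega
    have h2 : (if x - min mn x > md then x - min mn x else md) = max md (x - min mn x) := by omega
    rw [h1, h2]

theorem key (xs : List Int) : ∀ x mn md : Int,
    List.foldl max md (diffs mn (x :: xs)) = max md (max (smax x xs - mn) (bv x xs)) := by
  induction xs with
  | nil => intro x mn md; simp only [diffs, List.foldl, smax, bv]; omega
  | cons y t ih =>
    intro x mn md
    have h := ih y (min mn x) (max md (x - min mn x))
    simp only [diffs, List.foldl] at h ⊢
    rw [h]
    simp only [smax, bv]
    omega

theorem bfold (xs : List Int) : ∀ y c : Int,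
    List.foldl max c (List.zipWith (fun s x => s - x) (sufList (y :: xs)) (y :: xs))
      = max c (bv y xs) := by
  induction xs with
  | nil => intro y c; simp [sufList, bv]
  | cons z u ih =>
    intro y c
    rw [sufList_cons]
    simp only [List.zipWith, List.foldl]
    rw [ih z (max c (smax y (z :: u) - y))]
    simp only [bv]
    omega

theorem bv_nonneg (xs : List Int) : ∀ x : Int, 0 ≤ bv x xs := by
  induction xs with
  | nil => intro x; simp [bv]
  | cons y t ih =>
    intro x
    have := ih y
    simp only [bv]
    omega

-- ===== VERDICT (by name: the statement is the Claim_ definition above) =====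
theorem find_max_difference_spec : Claim_equal_find_max_difference := by
  intro numbers _
  unfold Spec_find_max_difference find_max_difference find_max_difference_alt
  match numbers with
  | [] => rfl
  | [x] => rfl
  | x :: y :: t =>
    have hlen : ¬ ((x :: y :: t).length < 2) := by simp
    rw [if_neg hlen, if_neg hlen]
    rw [sufList_cons]
    simp only [List.zipWith]
    rw [bfold t y (smax x (y :: t) - x)]
    rw [foldA_eq_diffs (x :: y :: t) x 0]
    rw [key (y :: t) x x 0]
    have h1 := bv_nonneg t y
    have h2 : bv x (y :: t) = max (smax x (y :: t) - x) (bv y t) := rfl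
    have h3 : smax x (y :: t) = max x (smax y t) := rfl
    congr 1
    omega
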